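-- pv_equiv track=rewrite | github.com/OsmanBahadirYlmz/4_DataProjects | Pyhton_koc/exam2/q2/solution.py | replicate_items
-- ===== SOURCE A (Python) =====
-- def replicate_items(L, k):
--     lenght=len(L)
--
--     for i in range(lenght):
--         for multip in range (k):
--
--             L.insert((i+lenght+i*k),L[i])
--
--
--
--     for i in range(lenght):
--
--         L.pop(0)
--
--     return L
-- ===== SOURCE B (Python) =====
-- def replicate_items(L, k):
--     n = len(L)
--     total = n * k
--     result = [L[j // k] for j in range(total)]
--     L[:] = result
--     return L
-- ===== Notes on version B (the rewrite author's own statement) =====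
-- stated objective: faster
-- what changed: Replaces A's nested insert-then-pop mutation loops (each insert/pop shifts the tail of the list) by one flat pass over the output positions j in range(n*k), taking L[j//k], assigned back in place with L[:]=.
import Mathlib
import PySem

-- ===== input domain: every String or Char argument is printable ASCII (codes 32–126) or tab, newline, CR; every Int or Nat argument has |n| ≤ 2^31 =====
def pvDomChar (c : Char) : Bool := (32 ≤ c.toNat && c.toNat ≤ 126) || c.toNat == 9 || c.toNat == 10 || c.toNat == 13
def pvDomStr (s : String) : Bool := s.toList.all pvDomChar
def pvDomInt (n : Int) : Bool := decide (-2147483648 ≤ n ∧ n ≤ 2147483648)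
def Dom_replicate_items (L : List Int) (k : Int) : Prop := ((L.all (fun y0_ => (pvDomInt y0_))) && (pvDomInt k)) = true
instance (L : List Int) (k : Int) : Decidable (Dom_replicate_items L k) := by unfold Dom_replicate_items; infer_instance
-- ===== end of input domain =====

-- B replaces A's nested insert-then-pop mutation loops by one flat pass over the
-- output indices j of range(n*k), taking L[j//k] (asymptotically fewer element moves).
-- Both Pythons mutate L in place and return it; the equivalence proved here is about the return value.

-- ===== PORT A =====
-- Literal port of A. Every L.insert position here is ≥ 0, every L[i] index is in
-- range and every pop(0) acts on a nonempty list (proved in the lemmas below), so the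
-- `getD` defaults of pyGetD/pop? are never taken and the port is exact.
def replicate_items (L : List Int) (k : Int) : List Int :=
  let lenght : Int := L.length
  let L1 : List Int :=
    (PySem.List.pyRange 0 lenght 1).foldl (fun acc i =>
      (PySem.List.pyRange 0 k 1).foldl (fun acc2 _ =>
        PySem.List.insert acc2 (i + lenght + i * k) (PySem.List.pyGetD acc2 i 0)) acc) L
  (PySem.List.pyRange 0 lenght 1).foldl (fun acc _ =>
      ((PySem.List.pop? acc 0).map Prod.snd).getD acc) L1

-- ===== PORT B =====
-- Literal port of B: list comprehension over range(n*k) of L[j // k].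
-- j // k is only evaluated on a nonempty range, where 0 ≤ j // k < n, so the
-- pyGetD default is never taken and the port is exact.
def replicate_items_alt (L : List Int) (k : Int) : List Int :=
  let n : Int := L.length
  let total : Int := n * k
  (PySem.List.pyRange 0 total 1).map (fun j =>
    PySem.List.pyGetD L (PySem.Int.floordiv j k) 0)

-- ===== PRECONDITION & SPEC =====
def Spec_replicate_items (L : List Int) (k : Int) (out : List Int) : Prop := out = replicate_items_alt L k
instance (L : List Int) (k : Int) (out : List Int) : Decidable (Spec_replicate_items L k out) := by unfold Spec_replicate_items; infer_instance

-- ===== CLAIM (what is proved, stated in full; the proofs are below) =====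
def Claim_equal_replicate_items : Prop := ∀ (L : List Int) (k : Int), Dom_replicate_items L k → Spec_replicate_items L k (replicate_items L k)

-- ===== LEMMAS AND PROOFS =====

-- a foldl whose function ignores the list element is an iterate
theorem pvFoldlConst {α β : Type} (g : α → α) :
    ∀ (l : List β) (a : α), l.foldl (fun x _ => g x) a = g^[l.length] a
  | [], _ => rfl
  | _ :: l, a => by
      simp [List.foldl, pvFoldlConst g l (g a), Function.iterate_succ_apply]

theorem pvLenFM (m : Nat) :
    ∀ (l : List Int), (l.flatMap (fun x => List.replicate m x)).length = l.length * m
  | [] => by simp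
  | x :: l => by simp [pvLenFM m l]; ring

theorem pvFMzero (l : List Int) : l.flatMap (fun x => List.replicate 0 x) = [] := by simp

-- inserting x into P ++ replicate t x at any position ≥ |P| just adds one more copy
theorem pvInsRep (P : List Int) (t : Nat) (x : Int) (p : Int)
    (hp : (P.length : Int) ≤ p) :
    PySem.List.insert (P ++ List.replicate t x) p x = P ++ List.replicate (t + 1) x := by
  have h0 : 0 ≤ p := le_trans (by positivity) hp
  have hP : P.length ≤ p.toNat := by omega
  have hmin : (min p ((P ++ List.replicate t x).length : Int)).toNat
      = min p.toNat (P ++ List.replicate t x).length := by omega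
  have hps : ¬ (p < 0) := by omega
  simp only [PySem.List.insert, PySem.List.sliceIndices]
  simp only [if_neg (by omega : ¬ ((1:Int) < 0)), hps, if_false]
  rw [hmin]
  rw [List.take_append, List.drop_append]
  rw [List.take_of_length_le (by simp [List.length_append]; omega),
      List.drop_of_length_le (by simp [List.length_append]; omega),
      List.take_replicate, List.drop_replicate]
  rw [show t + 1 = (min (min p.toNat (P ++ List.replicate t x).length - P.length) t)
      + (1 + (t - (min p.toNat (P ++ List.replicate t x).length - P.length))) by
        simp [List.length_append]; omega]
  rw [List.replicate_add, Nat.add_comm 1, List.replicate_succ]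
  simp [List.append_assoc]

-- iterating A's inner insert t times appends t copies of L[i]
theorem pvIterIns (L D : List Int) (i : Nat) (hi : i < L.length) (p : Int)
    (hp : ((L ++ D).length : Int) ≤ p) :
    ∀ t, (fun acc => PySem.List.insert acc p (PySem.List.pyGetD acc (i : Int) 0))^[t] (L ++ D)
        = (L ++ D) ++ List.replicate t (L[i]) := by
  intro t
  induction t with
  | zero => simp
  | succ t ih =>
      rw [Function.iterate_succ_apply', ih]
      have hlen : (i : Int) < (((L ++ D) ++ List.replicate t (L[i])).length : Int) := by
        simp; omega
      rw [PySem.List.pyGetD_eq_getElem _ _ (by omega) hlen]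
      have hget : ((L ++ D) ++ List.replicate t (L[i]))[(i : Int).toNat]'(by simp; omega) = L[i] := by
        simp only [Int.toNat_natCast]
        rw [List.getElem_append_left (by simp; omega)]
        rw [List.getElem_append_left hi]
      rw [hget]
      exact pvInsRep (L ++ D) t (L[i]) p hp

-- outer loop invariant of A for k > 0
theorem pvOuter (L : List Int) (k : Int) (hk : 0 < k) :
    ∀ i, i ≤ L.length →
      (PySem.List.pyRange 0 (i : Int) 1).foldl (fun acc iN =>
        (PySem.List.pyRange 0 k 1).foldl (fun acc2 _ =>
          PySem.List.insert acc2 (iN + (L.length : Int) + iN * k)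
            (PySem.List.pyGetD acc2 iN 0)) acc) L
      = L ++ (L.take i).flatMap (fun x => List.replicate k.toNat x) := by
  intro i
  induction i with
  | zero => simp [PySem.List.pyRange_one_eq_nil le_rfl]
  | succ i ih =>
      intro hle
      have hi : i < L.length := by omega
      have hcast : ((i + 1 : Nat) : Int) = (i : Int) + 1 := by push_cast; ring
      rw [hcast, PySem.List.pyRange_one_succ_right (by positivity), List.foldl_append,
        ih (by omega), List.foldl_cons, List.foldl_nil]
      rw [pvFoldlConst (fun acc2 => PySem.List.insert acc2 ((i : Int) + (L.length : Int) + (i : Int) * k)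
            (PySem.List.pyGetD acc2 (i : Int) 0))]
      have hkc : ((k.toNat : Int)) = k := Int.toNat_of_nonneg hk.le
      have hp : (((L ++ (L.take i).flatMap (fun x => List.replicate k.toNat x)).length : Int))
          ≤ (i : Int) + (L.length : Int) + (i : Int) * k := by
        have h1 : ((L.take i).flatMap (fun x => List.replicate k.toNat x)).length = i * k.toNat := by
          rw [pvLenFM, List.length_take, Nat.min_eq_left hi.le]
        simp only [List.length_append, h1]
        push_cast
        rw [hkc]
        nlinarith [Int.natCast_nonneg i]
      rw [PySem.List.length_pyRange_one, Int.sub_zero,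
        pvIterIns L _ i hi _ hp k.toNat]
      have htake : List.take (i + 1) L = List.take i L ++ [L[i]] := by
        rw [List.take_add_one, List.getElem?_eq_getElem hi]; rfl
      rw [htake, List.flatMap_append]
      simp [List.append_assoc]

-- A's popping loop: popping the front |P| times from P ++ R leaves R
theorem pvPops :
    ∀ (P R : List Int),
      (fun acc => ((PySem.List.pop? acc 0).map Prod.snd).getD acc)^[P.length] (P ++ R) = R
  | [], _ => rfl
  | x :: P, R => by
      rw [List.length_cons, Function.iterate_succ_apply]
      have h1 : ((PySem.List.pop? ((x :: P) ++ R) 0).map Prod.snd).getD ((x :: P) ++ R) = P ++ R := by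
        simp [PySem.List.pop?_zero_cons]
      rw [h1]
      exact pvPops P R

theorem pvA_eq (L : List Int) (k : Int) :
    replicate_items L k = L.flatMap (fun x => List.replicate k.toNat x) := by
  simp only [replicate_items]
  by_cases hk : 0 < k
  · rw [pvOuter L k hk L.length le_rfl, List.take_length]
    rw [pvFoldlConst (fun acc => ((PySem.List.pop? acc 0).map Prod.snd).getD acc)]
    rw [PySem.List.length_pyRange_one, Int.sub_zero, Int.toNat_natCast]
    exact pvPops L (L.flatMap (fun x => List.replicate k.toNat x))
  · have hk' : k ≤ 0 := by omega
    have hk0 : k.toNat = 0 := by omega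
    rw [hk0, pvFMzero]
    simp only [PySem.List.pyRange_one_eq_nil hk', List.foldl_nil]
    have hid : (PySem.List.pyRange 0 ((L.length : Int)) 1).foldl (fun acc (_ : Int) => acc) L = L := by
      rw [pvFoldlConst (fun acc : List Int => acc)]
      exact Function.iterate_fixed rfl _
    rw [hid]
    rw [pvFoldlConst (fun acc => ((PySem.List.pop? acc 0).map Prod.snd).getD acc)]
    rw [PySem.List.length_pyRange_one, Int.sub_zero, Int.toNat_natCast]
    have h2 := pvPops L ([] : List Int)
    simpa using h2

-- B: index arithmetic j ↦ j / m realises "each element m times"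
theorem pvKeyB (m : Nat) (hm : 0 < m) :
    ∀ (L : List Int),
      (List.range (L.length * m)).map (fun j => L.getD (j / m) 0)
        = L.flatMap (fun x => List.replicate m x)
  | [] => by simp
  | x :: xs => by
      have hlen : (x :: xs).length * m = m + xs.length * m := by
        simp [List.length_cons, Nat.succ_mul, Nat.add_comm]
      rw [hlen, List.range_add, List.map_append, List.map_map]
      have h1 : (List.range m).map (fun j => (x :: xs).getD (j / m) 0) = List.replicate m x := by
        rw [List.eq_replicate_iff]
        refine ⟨by simp, ?_⟩
        intro b hb
        simp only [List.mem_map, List.mem_range] at hb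
        obtain ⟨j, hj, rfl⟩ := hb
        rw [Nat.div_eq_of_lt hj]
        rfl
      have h2 : (List.range (xs.length * m)).map ((fun j => (x :: xs).getD (j / m) 0) ∘ (fun j => m + j))
          = (List.range (xs.length * m)).map (fun j => xs.getD (j / m) 0) := by
        apply List.map_congr_left
        intro j _
        simp only [Function.comp_apply]
        rw [Nat.add_div_left j hm, List.getD_cons_succ]
      rw [h1, h2, pvKeyB m hm xs, List.flatMap_cons]

theorem pvB_eq (L : List Int) (k : Int) :
    replicate_items_alt L k = L.flatMap (fun x => List.replicate k.toNat x) := by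
  simp only [replicate_items_alt]
  by_cases hk : 0 < k
  · have hkc : ((k.toNat : Int)) = k := Int.toNat_of_nonneg hk.le
    have htot : (L.length : Int) * k = ((L.length * k.toNat : Nat) : Int) := by
      push_cast; rw [hkc]
    rw [htot, PySem.List.pyRange_zero_nat, List.map_map]
    have hfun : (List.range (L.length * k.toNat)).map
          ((fun j => PySem.List.pyGetD L (PySem.Int.floordiv j k) 0) ∘ (fun j : Nat => (j : Int)))
        = (List.range (L.length * k.toNat)).map (fun j => L.getD (j / k.toNat) 0) := by
      apply List.map_congr_left
      intro j _
      simp only [Function.comp_apply]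
      conv_lhs => rw [← hkc]
      rw [PySem.Int.floordiv_natCast, PySem.List.pyGetD_natCast]
    rw [hfun]
    exact pvKeyB k.toNat (by omega) L
  · have h0 : (L.length : Int) * k ≤ 0 :=
      mul_nonpos_iff.mpr (Or.inl ⟨by positivity, by omega⟩)
    rw [PySem.List.pyRange_one_eq_nil h0, List.map_nil,
      show k.toNat = 0 by omega, pvFMzero]

-- ===== VERDICT (by name: the statement is the Claim_ definition above) =====
theorem replicate_items_spec : Claim_equal_replicate_items := by
  intro L k _
  unfold Spec_replicate_items
  rw [pvA_eq, pvB_eq]
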